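-- pv_equiv track=rewrite | github.com/johndoe31415/digtick | src/digtick/QuineMcCluskey.py | _filter_min_bit_count
-- ===== SOURCE A (Python) =====
-- def _filter_min_bit_count(terms: set[int]) -> set[int]:
-- 	result = None
-- 	min_bit_count = None
-- 	for value in terms:
-- 		if (result is None) or (value.bit_count() < min_bit_count):
-- 			min_bit_count = value.bit_count()
-- 			result = set([ value ])
-- 		elif value.bit_count() == min_bit_count:
-- 			result.add(value)
-- 	return result
-- ===== SOURCE B (Python) =====
-- def _filter_min_bit_count(terms: set[int]) -> set[int]:
-- 	# Two separated passes instead of A's fused track-and-rebuild loop: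
-- 	# first compute the minimum popcount, then filter by it.
-- 	if not terms:
-- 		return None
-- 	min_bit_count = min(value.bit_count() for value in terms)
-- 	return {value for value in terms if value.bit_count() == min_bit_count}
-- ===== Notes on version B (the rewrite author's own statement) =====
-- stated objective: simpler
-- what changed: A's single fused loop that tracks the running minimum and rebuilds/extends the result set on the fly is replaced by two separated passes: one min() reduction over the bit counts, then one set comprehension filtering on that minimum.
-- outside the precondition, e.g. on _filter_min_bit_count(set()): A returns None, B returns None
import Mathlib
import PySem

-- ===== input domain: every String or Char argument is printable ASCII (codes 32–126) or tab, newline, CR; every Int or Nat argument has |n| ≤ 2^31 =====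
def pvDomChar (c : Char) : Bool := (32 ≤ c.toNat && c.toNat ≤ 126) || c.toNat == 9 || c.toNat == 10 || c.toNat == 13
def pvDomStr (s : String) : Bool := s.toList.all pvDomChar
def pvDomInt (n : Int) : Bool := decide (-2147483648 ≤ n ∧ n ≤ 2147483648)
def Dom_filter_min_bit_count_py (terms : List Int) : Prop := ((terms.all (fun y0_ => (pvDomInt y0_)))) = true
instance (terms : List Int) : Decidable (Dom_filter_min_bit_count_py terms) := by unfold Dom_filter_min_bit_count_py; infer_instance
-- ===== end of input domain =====

-- B replaces A's fused track-the-minimum-and-rebuild loop by two separated passes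
-- (a min() reduction, then a filtering set comprehension); objective: simpler.

-- ===== PORT A =====
-- Loop body of A's for-loop. A keeps two variables `result` / `min_bit_count` that are
-- None exactly together; the port carries them as one Option of a pair.
def fmbcStepA (st : Option (PySem.Set Int × Nat)) (value : Int) : Option (PySem.Set Int × Nat) :=
  match st with
  | none => some (PySem.Set.ofList [value], PySem.Int.bitCount value)   -- result is None branch
  | some (result, min_bit_count) =>
      if PySem.Int.bitCount value < min_bit_count then
        some (PySem.Set.ofList [value], PySem.Int.bitCount value)
      else if PySem.Int.bitCount value = min_bit_count then
        some (PySem.Set.add result value, min_bit_count)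
      else
        some (result, min_bit_count)

def filter_min_bit_count_py (terms : List Int) : List Int :=
  match terms.foldl fmbcStepA none with
  | none => []          -- Python returns None here (empty input); excluded by Pre_
  | some (result, _) => result

-- ===== PORT B =====
def filter_min_bit_count_py_alt (terms : List Int) : List Int :=
  match PySem.List.min? (terms.map PySem.Int.bitCount) (fun x => x) with
  | none => []          -- Python returns None here (empty input); excluded by Pre_
  | some m => PySem.Set.ofList (terms.filter (fun value => PySem.Int.bitCount value == m))

-- ===== PRECONDITION & SPEC =====
-- Pre_ excludes only the empty set, on which A (and B) return None, not a value of type set[int].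
def Pre_filter_min_bit_count_py (terms : List Int) : Prop := terms ≠ []
instance (terms : List Int) : Decidable (Pre_filter_min_bit_count_py terms) := by
  unfold Pre_filter_min_bit_count_py; infer_instance

def pvWitness_filter_min_bit_count_py : List Int := [3, 4, 12]

def Spec_filter_min_bit_count_py (terms : List Int) (out : List Int) : Prop := out = filter_min_bit_count_py_alt terms
instance (terms : List Int) (out : List Int) : Decidable (Spec_filter_min_bit_count_py terms out) := by unfold Spec_filter_min_bit_count_py; infer_instance

-- ===== CLAIM (what is proved, stated in full; the proofs are below) =====
def Claim_equal_filter_min_bit_count_py : Prop := ∀ (terms : List Int), Dom_filter_min_bit_count_py terms → Pre_filter_min_bit_count_py terms → Spec_filter_min_bit_count_py terms (filter_min_bit_count_py terms)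

-- ===== LEMMAS AND PROOFS =====

-- Loop invariant for A's fold: from a state that is "the min-popcount elements of a
-- nonempty prefix p, together with that minimum", the fold over xs lands in the same
-- shape for p ++ xs; the running minimum is the fold of `min` over the bit counts.
theorem fmbc_loop (xs : List Int) : ∀ (p : List Int) (m : Nat),
    (∀ w ∈ p, m ≤ PySem.Int.bitCount w) →
    xs.foldl fmbcStepA
        (some (PySem.Set.ofList (p.filter (fun v => PySem.Int.bitCount v == m)), m)) =
      some (PySem.Set.ofList
              ((p ++ xs).filter (fun v =>
                PySem.Int.bitCount v == xs.foldl (fun a w => min a (PySem.Int.bitCount w)) m)),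
            xs.foldl (fun a w => min a (PySem.Int.bitCount w)) m) := by
  induction xs with
  | nil => intro p m _; simp
  | cons x xs ih =>
    intro p m hlb
    simp only [List.foldl_cons, fmbcStepA]
    by_cases h1 : PySem.Int.bitCount x < m
    · rw [if_pos h1]
      have hmin : min m (PySem.Int.bitCount x) = PySem.Int.bitCount x := by omega
      have hemp : p.filter (fun v => PySem.Int.bitCount v == PySem.Int.bitCount x) = [] := by
        apply List.filter_eq_nil_iff.mpr
        intro w hw
        have := hlb w hw
        simp only [beq_iff_eq]
        omega
      have hx : PySem.Set.ofList [x]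
          = PySem.Set.ofList ((p ++ [x]).filter (fun v => PySem.Int.bitCount v == PySem.Int.bitCount x)) := by
        rw [List.filter_append, hemp]
        simp
      rw [hx]
      have := ih (p ++ [x]) (PySem.Int.bitCount x)
        (by intro w hw
            rcases List.mem_append.mp hw with h | h
            · have := hlb w h; omega
            · simp at h; subst h; exact le_refl _)
      simpa [hmin] using this
    · rw [if_neg h1]
      by_cases h2 : PySem.Int.bitCount x = m
      · rw [if_pos h2]
        have hmin : min m (PySem.Int.bitCount x) = m := by omega
        have hadd : PySem.Set.add
            (PySem.Set.ofList (p.filter (fun v => PySem.Int.bitCount v == m))) x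
            = PySem.Set.ofList ((p ++ [x]).filter (fun v => PySem.Int.bitCount v == m)) := by
          rw [List.filter_append]
          have : ([x].filter (fun v => PySem.Int.bitCount v == m)) = [x] := by simp [h2]
          rw [this, PySem.Set.ofList_eq_foldl, PySem.Set.ofList_eq_foldl, List.foldl_append]
          rfl
        rw [hadd]
        have := ih (p ++ [x]) m
          (by intro w hw
              rcases List.mem_append.mp hw with h | h
              · exact hlb w h
              · simp at h; subst h; omega)
        simpa [hmin] using this
      · rw [if_neg h2]
        have hmin : min m (PySem.Int.bitCount x) = m := by omega
        have hsame : (p ++ [x]).filter (fun v => PySem.Int.bitCount v == m)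
            = p.filter (fun v => PySem.Int.bitCount v == m) := by
          rw [List.filter_append]
          have : ([x].filter (fun v => PySem.Int.bitCount v == m)) = [] := by simp [h2]
          simp [this]
        have := ih (p ++ [x]) m
          (by intro w hw
              rcases List.mem_append.mp hw with h | h
              · exact hlb w h
              · simp at h; subst h; omega)
        rw [← hsame]
        simpa [hmin] using this

-- ===== VERDICT (by name: the statement is the Claim_ definition above) =====
theorem filter_min_bit_count_py_spec : Claim_equal_filter_min_bit_count_py := by
  intro terms _ hpre
  unfold Spec_filter_min_bit_count_py
  match terms with
  | [] => exact absurd rfl hpre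
  | v :: xs =>
    unfold filter_min_bit_count_py filter_min_bit_count_py_alt
    have hA := fmbc_loop xs [v] (PySem.Int.bitCount v) (by intro w hw; simp at hw; subst hw; exact le_refl _)
    have hstart : ([v].filter (fun w => PySem.Int.bitCount w == PySem.Int.bitCount v)) = [v] := by simp
    rw [hstart] at hA
    have hB : PySem.List.min? ((v :: xs).map PySem.Int.bitCount) (fun x => x)
        = some ((xs.map PySem.Int.bitCount).foldl min (PySem.Int.bitCount v)) := by
      rw [List.map_cons]
      exact PySem.List.min?_id_cons (x := PySem.Int.bitCount v) (t := xs.map PySem.Int.bitCount)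
    rw [hB]
    simp only [List.foldl_cons, fmbcStepA, List.foldl_map] at hA ⊢
    rw [hA]
    simp
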